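-- pv_equiv track=rewrite | github.com/talkad/OMPify | parsers/clang/injector.py | mark_for_loop
-- ===== SOURCE A (Python) =====
-- def mark_for_loop(code):
--     updated_code = []
--     loop_func = 'for_loop_talkad7420();'
--
--     for line in code.split('\n'):
--         l = line.lstrip().lower()
--
--         if l.startswith('for ') or l.startswith('for('):
--             updated_code.append(loop_func)
--         updated_code.append(line)
--
--     return '\n'.join(updated_code)
-- ===== SOURCE B (Python) =====
-- def mark_for_loop(code):
--     marker = 'for_loop_talkad7420();\n'
--     out = []
--     n = len(code)
--     i = 0
--     while True:
--         # does the line starting at i begin (after horizontal whitespace) with 'for ' or 'for('?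
--         j = i
--         while j < n and code[j] in ' \t\r\x0b\x0c':
--             j += 1
--         if code[j:j+3].lower() == 'for' and j + 3 < n and code[j+3] in ' (':
--             out.append(marker)
--         k = code.find('\n', i)
--         if k == -1:
--             out.append(code[i:])
--             break
--         out.append(code[i:k+1])
--         i = k + 1
--     return ''.join(out)
-- ===== Notes on version B (the rewrite author's own statement) =====
-- stated objective: alternative
-- what changed: Replaced the per-line split/lstrip/lower/startswith loop with a single index-based scan of the raw string that skips horizontal whitespace, tests the four relevant characters case-insensitively in place, and copies each line (newline included) via slices located by find.
import Mathlib
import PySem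

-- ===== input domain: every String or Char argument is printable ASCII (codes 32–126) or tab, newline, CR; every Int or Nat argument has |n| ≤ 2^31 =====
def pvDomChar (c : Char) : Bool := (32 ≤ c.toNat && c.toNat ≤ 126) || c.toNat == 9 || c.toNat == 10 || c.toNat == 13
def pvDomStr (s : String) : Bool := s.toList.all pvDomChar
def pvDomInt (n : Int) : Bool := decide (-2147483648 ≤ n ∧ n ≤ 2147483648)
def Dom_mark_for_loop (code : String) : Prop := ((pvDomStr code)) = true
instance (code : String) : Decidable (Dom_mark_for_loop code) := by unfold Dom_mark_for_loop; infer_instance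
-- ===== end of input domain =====

-- B replaces A's split/lstrip/lower/startswith per-line loop by a single index-based scan of the raw
-- string (alternative decomposition, same O(n) cost).

-- termination helper cited by the ports' decreasing_by
theorem pvTail_dropWhile_lt (p : Char → Bool) (cs : List Char)
    (h : ¬ List.dropWhile p cs = []) : (List.dropWhile p cs).tail.length < cs.length := by
  have hs : (List.dropWhile p cs).length ≤ cs.length := (List.dropWhile_sublist p).length_le
  have hp : 0 < (List.dropWhile p cs).length := List.length_pos_iff.mpr h
  have ht : (List.dropWhile p cs).tail.length = (List.dropWhile p cs).length - 1 := List.length_tail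
  omega

-- ===== PORT A =====
def mark_for_loop (code : String) : String :=
  let loop_func : List Char := "for_loop_talkad7420();".toList
  let updated_code : List (List Char) :=
    (PySem.Chars.splitOn code.toList ['\n']).foldl
      (fun acc line =>
        let l := PySem.Chars.lower (PySem.Chars.lstrip line)
        let acc := if PySem.Chars.startswith l "for ".toList || PySem.Chars.startswith l "for(".toList
                   then acc ++ [loop_func] else acc
        acc ++ [line]) []
  String.mk (PySem.Chars.join ['\n'] updated_code)

-- ===== PORT B =====
-- Source B's horizontal-whitespace set ' \t\r\x0b\x0c'
def pvWsB (c : Char) : Bool := c == ' ' || c == '\t' || c == '\r' || c == Char.ofNat 11 || c == Char.ofNat 12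

-- Source B's head test after the whitespace skip: code[j:j+3].lower() == 'for' and code[j+3] in ' ('
def pvMatch4 (l : List Char) : Bool :=
  match l with
  | a :: b :: c :: d :: _ =>
      PySem.Chars.lowerChar a == 'f' && PySem.Chars.lowerChar b == 'o' && PySem.Chars.lowerChar c == 'r' &&
      (d == ' ' || d == '(')
  | _ => false

def pvForHead (cs : List Char) : Bool := pvMatch4 (cs.dropWhile pvWsB)

def pvMarker : List Char := "for_loop_talkad7420();\n".toList

-- the while-loop of Source B: one iteration per line; 'find found no newline' is the if k == -1 branch
def pvAltGo (cs : List Char) : List Char :=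
  let pre := if pvForHead cs then pvMarker else []
  let line := cs.takeWhile (fun c => c != '\n')
  let rest := cs.dropWhile (fun c => c != '\n')
  if h : rest = [] then pre ++ line
  else pre ++ line ++ '\n' :: pvAltGo rest.tail
termination_by cs.length
decreasing_by exact pvTail_dropWhile_lt _ cs h

def mark_for_loop_alt (code : String) : String := String.mk (pvAltGo code.toList)

-- ===== PRECONDITION & SPEC =====
def Spec_mark_for_loop (code : String) (out : String) : Prop := out = mark_for_loop_alt code
instance (code : String) (out : String) : Decidable (Spec_mark_for_loop code out) := by unfold Spec_mark_for_loop; infer_instance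

-- ===== CLAIM (what is proved, stated in full; the proofs are below) =====
def Claim_equal_mark_for_loop : Prop := ∀ (code : String), Dom_mark_for_loop code → Spec_mark_for_loop code (mark_for_loop code)

-- ===== LEMMAS AND PROOFS =====

-- reference line splitter: split on '\n', mirroring pvAltGo's recursion
def pvSplitNL (cs : List Char) : List (List Char) :=
  let line := cs.takeWhile (fun c => c != '\n')
  let rest := cs.dropWhile (fun c => c != '\n')
  if h : rest = [] then [line] else line :: pvSplitNL rest.tail
termination_by cs.length
decreasing_by exact pvTail_dropWhile_lt _ cs h

-- A's per-line condition
def pvCond (line : List Char) : Bool :=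
  PySem.Chars.startswith (PySem.Chars.lower (PySem.Chars.lstrip line)) "for ".toList ||
  PySem.Chars.startswith (PySem.Chars.lower (PySem.Chars.lstrip line)) "for(".toList

theorem pvSplitNL_ne_nil (cs : List Char) : pvSplitNL cs ≠ [] := by
  rw [pvSplitNL]
  split <;> simp

theorem pvSplitNL_nil : pvSplitNL [] = [[]] := by
  rw [pvSplitNL]; simp

theorem pvSplitNL_cons_nl (rest : List Char) : pvSplitNL ('\n' :: rest) = [] :: pvSplitNL rest := by
  rw [pvSplitNL]
  have hd : List.dropWhile (fun c => c != '\n') ('\n' :: rest) = '\n' :: rest := by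
    simp
  have ht : List.takeWhile (fun c => c != '\n') ('\n' :: rest) = [] := by
    simp
  simp only [hd, ht]
  simp

theorem pvSplitNL_cons_ne {c : Char} (rest : List Char) (hc : (c != '\n') = true) :
    pvSplitNL (c :: rest) = (pvSplitNL rest).modifyHead (fun x => c :: x) := by
  conv_lhs => rw [pvSplitNL]
  conv_rhs => rw [pvSplitNL]
  have hd : List.dropWhile (fun c => c != '\n') (c :: rest) = List.dropWhile (fun c => c != '\n') rest := by
    simp [hc]
  have ht : List.takeWhile (fun c => c != '\n') (c :: rest) = c :: List.takeWhile (fun c => c != '\n') rest := by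
    simp [hc]
  by_cases h : List.dropWhile (fun c => c != '\n') rest = [] <;>
    simp [hd, ht, h]

theorem pvGo_eq (fuel : Nat) : ∀ (l cur : List Char) (acc : List (List Char)), l.length < fuel →
    PySem.Chars.splitOn.go ['\n'] fuel l cur acc =
      acc.reverse ++ (pvSplitNL l).modifyHead (fun x => cur.reverse ++ x) := by
  induction fuel with
  | zero => intro l cur acc h; omega
  | succ f ih =>
    intro l cur acc h
    cases l with
    | nil =>
      rw [PySem.Chars.splitOn.go] <;> simp [pvSplitNL_nil]
    | cons c rest =>
      rw [PySem.Chars.splitOn.go]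
      by_cases hc : c = '\n'
      · subst hc
        have hp : ['\n'].isPrefixOf ('\n' :: rest) = true := by simp [List.isPrefixOf]
        rw [if_pos hp]
        have hdrop : List.drop (['\n'] : List Char).length ('\n' :: rest) = rest := by simp
        rw [hdrop, ih rest [] (cur.reverse :: acc) (by simpa using Nat.lt_of_succ_lt_succ h)]
        rw [pvSplitNL_cons_nl]
        obtain ⟨p, ps, hq⟩ := List.exists_cons_of_ne_nil (pvSplitNL_ne_nil rest)
        rw [hq]
        simp
      · have hp : ['\n'].isPrefixOf (c :: rest) = false := by
          simp [List.isPrefixOf]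
          exact fun h => hc h.symm
        rw [hp, if_neg Bool.false_ne_true]
        rw [ih rest (c :: cur) acc (by simpa using Nat.lt_of_succ_lt_succ h)]
        rw [pvSplitNL_cons_ne rest (by simp [hc])]
        obtain ⟨p, ps, hq⟩ := List.exists_cons_of_ne_nil (pvSplitNL_ne_nil rest)
        rw [hq]
        simp

theorem pvSplitOn_nl (cs : List Char) : PySem.Chars.splitOn cs ['\n'] = pvSplitNL cs := by
  unfold PySem.Chars.splitOn
  rw [pvGo_eq (cs.length + 1) cs [] [] (Nat.lt_succ_self _)]
  obtain ⟨p, ps, hq⟩ := List.exists_cons_of_ne_nil (pvSplitNL_ne_nil cs)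
  rw [hq]
  simp

theorem pvFoldA (lines : List (List Char)) (init : List (List Char)) :
    lines.foldl
      (fun acc line =>
        let l := PySem.Chars.lower (PySem.Chars.lstrip line)
        let acc := if PySem.Chars.startswith l "for ".toList || PySem.Chars.startswith l "for(".toList
                   then acc ++ ["for_loop_talkad7420();".toList] else acc
        acc ++ [line]) init
    = init ++ lines.flatMap (fun line =>
        (if pvCond line then ["for_loop_talkad7420();".toList] else []) ++ [line]) := by
  induction lines generalizing init with
  | nil => simp
  | cons p t ih =>
    simp only [List.foldl_cons, List.flatMap_cons]
    rw [ih]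
    simp only [pvCond]
    split_ifs <;> simp [List.append_assoc]

-- character arithmetic helpers
theorem pvChar_eq_iff (a b : Char) : a = b ↔ a.toNat = b.toNat := by
  constructor
  · intro h; rw [h]
  · intro h; exact Char.ext (UInt32.toNat_inj.mp h)

theorem pvIsupper_iff (c : Char) : PySem.Chars.isupper c = true ↔ 65 ≤ c.toNat ∧ c.toNat ≤ 90 := by
  have hA : ('A' : Char).val.toNat = 65 := rfl
  have hZ : ('Z' : Char).val.toNat = 90 := rfl
  simp only [PySem.Chars.isupper, Bool.and_eq_true, decide_eq_true_eq, Char.le_def,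
    UInt32.le_iff_toNat_le, hA, hZ]
  exact Iff.rfl

theorem pvLowerChar_toNat (c : Char) :
    (PySem.Chars.lowerChar c).toNat = if 65 ≤ c.toNat ∧ c.toNat ≤ 90 then c.toNat + 32 else c.toNat := by
  unfold PySem.Chars.lowerChar
  by_cases h : PySem.Chars.isupper c = true
  · have hb := (pvIsupper_iff c).mp h
    rw [if_pos h, if_pos hb, Char.toNat_ofNat, if_pos]
    left; omega
  · have hb : ¬(65 ≤ c.toNat ∧ c.toNat ≤ 90) := fun hh => h ((pvIsupper_iff c).mpr hh)
    rw [if_neg h, if_neg hb]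

theorem pvIsPrefixOf_false {p s : List Char} (h : s.length < p.length) : p.isPrefixOf s = false := by
  cases hb : p.isPrefixOf s
  · rfl
  · exact absurd (List.isPrefixOf_iff_prefix.mp hb).length_le (by omega)

theorem pvMatch4_short (l : List Char) (h : l.length ≤ 3) : pvMatch4 l = false := by
  rcases l with _ | ⟨a, _ | ⟨b, _ | ⟨c, _ | ⟨d, t⟩⟩⟩⟩ <;> first | rfl | (simp at h; omega)

-- A's startswith condition on a line equals the 4-character test used by B
theorem pvHead4 (l : List Char) :
    (PySem.Chars.startswith (PySem.Chars.lower l) "for ".toList ||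
     PySem.Chars.startswith (PySem.Chars.lower l) "for(".toList) = pvMatch4 l := by
  have hpat1 : "for ".toList = ['f', 'o', 'r', ' '] := by decide
  have hpat2 : "for(".toList = ['f', 'o', 'r', '('] := by decide
  rcases l with _ | ⟨a, _ | ⟨b, _ | ⟨c, _ | ⟨d, t⟩⟩⟩⟩
  · rw [pvMatch4_short _ (by simp)]
    simp only [PySem.Chars.startswith, PySem.Chars.lower, hpat1, hpat2, List.map_nil]
    rw [pvIsPrefixOf_false (by simp), pvIsPrefixOf_false (by simp)]
    rfl
  · rw [pvMatch4_short _ (by simp)]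
    simp only [PySem.Chars.startswith, PySem.Chars.lower, hpat1, hpat2, List.map_cons, List.map_nil]
    rw [pvIsPrefixOf_false (by simp), pvIsPrefixOf_false (by simp)]
    rfl
  · rw [pvMatch4_short _ (by simp)]
    simp only [PySem.Chars.startswith, PySem.Chars.lower, hpat1, hpat2, List.map_cons, List.map_nil]
    rw [pvIsPrefixOf_false (by simp), pvIsPrefixOf_false (by simp)]
    rfl
  · rw [pvMatch4_short _ (by simp)]
    simp only [PySem.Chars.startswith, PySem.Chars.lower, hpat1, hpat2, List.map_cons, List.map_nil]
    rw [pvIsPrefixOf_false (by simp), pvIsPrefixOf_false (by simp)]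
    rfl
  · have hf : ('f' : Char).toNat = 102 := rfl
    have ho : ('o' : Char).toNat = 111 := rfl
    have hr : ('r' : Char).toNat = 114 := rfl
    have hsp : (' ' : Char).toNat = 32 := rfl
    have hpa : ('(' : Char).toNat = 40 := rfl
    rw [Bool.eq_iff_iff]
    simp only [PySem.Chars.startswith, PySem.Chars.lower, hpat1, hpat2, List.map_cons, pvMatch4,
      List.isPrefixOf_iff_prefix, List.cons_prefix_cons, List.nil_prefix, and_true,
      Bool.and_eq_true, Bool.or_eq_true, beq_iff_eq, pvChar_eq_iff, pvLowerChar_toNat,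
      hf, ho, hr, hsp, hpa]
    split_ifs <;> omega

-- the whitespace Source B skips agrees with str.lstrip's on Dom characters other than '\n'
theorem pvWs_eq_isspace (c : Char) (hdc : pvDomChar c = true) (hn : (c != '\n') = true) :
    PySem.Chars.isspace c = pvWsB c := by
  have h10 : c.toNat ≠ 10 := by
    intro h
    have : c = '\n' := (pvChar_eq_iff c '\n').mpr (by simpa using h)
    simp [this] at hn
  have hdom' : ((32 ≤ c.toNat ∧ c.toNat ≤ 126) ∨ c.toNat = 9) ∨ c.toNat = 10 ∨ c.toNat = 13 := by
    have := hdc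
    simp only [pvDomChar, Bool.or_eq_true, Bool.and_eq_true, decide_eq_true_eq, beq_iff_eq] at this
    tauto
  have hsp : (' ' : Char).toNat = 32 := rfl
  have htb : ('\t' : Char).toNat = 9 := rfl
  have hcr : ('\r' : Char).toNat = 13 := rfl
  have h11 : (Char.ofNat 11).toNat = 11 := rfl
  have h12 : (Char.ofNat 12).toNat = 12 := rfl
  rw [Bool.eq_iff_iff]
  simp only [PySem.Chars.isspace, pvWsB, pvChar_eq_iff, beq_iff_eq, hsp, htb, hcr, h11, h12,
    Bool.or_eq_true, Bool.and_eq_true, decide_eq_true_eq]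
  omega

theorem pvDropTake (cs : List Char) (hdom : ∀ c ∈ cs, pvDomChar c = true) :
    (List.takeWhile (fun c => c != '\n') cs).dropWhile PySem.Chars.isspace =
    List.takeWhile (fun c => c != '\n') (cs.dropWhile pvWsB) := by
  induction cs with
  | nil => simp
  | cons c rest ih =>
    have hdc := hdom c (by simp)
    have hdr : ∀ x ∈ rest, pvDomChar x = true := fun x hx => hdom x (by simp [hx])
    by_cases hn : c = '\n'
    · subst hn
      have hw : pvWsB '\n' = false := by decide
      simp [hw]
    · have hn' : (c != '\n') = true := by simp [hn]
      by_cases hw : pvWsB c = true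
      · have hs : PySem.Chars.isspace c = true := by rw [pvWs_eq_isspace c hdc hn']; exact hw
        simp [hn', hw, hs, ih hdr]
      · rw [Bool.not_eq_true] at hw
        have hs : PySem.Chars.isspace c = false := by rw [pvWs_eq_isspace c hdc hn']; exact hw
        simp [hn', hw, hs]

theorem pvMatch4_takeWhile (D : List Char) :
    pvMatch4 (List.takeWhile (fun c => c != '\n') D) = pvMatch4 D := by
  have hlf : (PySem.Chars.lowerChar '\n' == 'f') = false := by decide
  have hlo : (PySem.Chars.lowerChar '\n' == 'o') = false := by decide
  have hlr : (PySem.Chars.lowerChar '\n' == 'r') = false := by decide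
  have hnl : (('\n' : Char) == ' ' || ('\n' : Char) == '(') = false := by decide
  rcases D with _ | ⟨a, _ | ⟨b, _ | ⟨c, _ | ⟨d, t⟩⟩⟩⟩
  · rfl
  · rw [pvMatch4_short _ (le_trans (List.takeWhile_sublist _).length_le (by simp)),
      pvMatch4_short _ (by simp)]
  · rw [pvMatch4_short _ (le_trans (List.takeWhile_sublist _).length_le (by simp)),
      pvMatch4_short _ (by simp)]
  · rw [pvMatch4_short _ (le_trans (List.takeWhile_sublist _).length_le (by simp)),
      pvMatch4_short _ (by simp)]
  · by_cases ha : a = '\n'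
    · subst ha
      simp [pvMatch4, hlf]
    · have ha' : (a != '\n') = true := by simp [ha]
      by_cases hb : b = '\n'
      · subst hb
        simp [pvMatch4, ha', hlo]
      · have hb' : (b != '\n') = true := by simp [hb]
        by_cases hc : c = '\n'
        · subst hc
          simp [pvMatch4, ha', hb', hlr]
        · have hc' : (c != '\n') = true := by simp [hc]
          by_cases hd : d = '\n'
          · subst hd
            simp [pvMatch4, ha', hb', hc', hnl]
          · have hd' : (d != '\n') = true := by simp [hd]
            simp [pvMatch4, ha', hb', hc', hd']

theorem pvCond_eq (cs : List Char) (hdom : ∀ c ∈ cs, pvDomChar c = true) :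
    pvCond (cs.takeWhile (fun c => c != '\n')) = pvForHead cs := by
  unfold pvCond pvForHead
  rw [pvHead4]
  show pvMatch4 (List.dropWhile PySem.Chars.isspace _) = _
  rw [pvDropTake cs hdom, pvMatch4_takeWhile]

theorem pvMainAux (n : Nat) : ∀ (cs : List Char), cs.length ≤ n → (∀ c ∈ cs, pvDomChar c = true) →
    PySem.Chars.join ['\n'] ((pvSplitNL cs).flatMap (fun line =>
      (if pvCond line then ["for_loop_talkad7420();".toList] else []) ++ [line])) = pvAltGo cs := by
  have hm : pvMarker = "for_loop_talkad7420();".toList ++ ['\n'] := by decide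
  induction n with
  | zero =>
    intro cs hlen hdom
    have hnil : cs = [] := List.eq_nil_of_length_eq_zero (Nat.le_zero.mp hlen)
    subst hnil
    rw [pvSplitNL_nil, pvAltGo]
    have hc : pvCond [] = false := by decide
    have hf : pvForHead [] = false := by decide
    simp [hc, hf, PySem.Chars.join_singleton]
  | succ m ih =>
    intro cs hlen hdom
    have hF := pvCond_eq cs hdom
    by_cases hr : List.dropWhile (fun c => c != '\n') cs = []
    · rw [pvSplitNL, pvAltGo]
      cases hfh : pvForHead cs
      · have hcc : pvCond (cs.takeWhile (fun c => c != '\n')) = false := by rw [hF, hfh]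
        simp [hr, hfh, hcc, PySem.Chars.join_singleton]
      · have hcc : pvCond (cs.takeWhile (fun c => c != '\n')) = true := by rw [hF, hfh]
        simp [hr, hfh, hcc, PySem.Chars.join_cons_cons, PySem.Chars.join_singleton, hm,
          List.append_assoc]
    · obtain ⟨x, tl, hxtl⟩ := List.exists_cons_of_ne_nil hr
      have hlen' : tl.length ≤ m := by
        have h1 : (List.dropWhile (fun c => c != '\n') cs).length ≤ cs.length :=
          (List.dropWhile_sublist _).length_le
        rw [hxtl] at h1
        simp at h1
        omega
      have hdom' : ∀ c ∈ tl, pvDomChar c = true := fun c hcm =>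
        hdom c ((List.dropWhile_sublist _).subset (hxtl ▸ List.mem_cons_of_mem x hcm))
      have hIH := ih tl hlen' hdom'
      obtain ⟨r, rs, hflat⟩ := List.exists_cons_of_ne_nil
        (show (pvSplitNL tl).flatMap (fun line =>
            (if pvCond line then ["for_loop_talkad7420();".toList] else []) ++ [line]) ≠ [] by
          obtain ⟨q, qs, hq⟩ := List.exists_cons_of_ne_nil (pvSplitNL_ne_nil tl)
          rw [hq]
          cases pvCond q <;> simp)
      rw [hflat] at hIH
      rw [pvSplitNL, pvAltGo]
      cases hfh : pvForHead cs
      · have hcc : pvCond (cs.takeWhile (fun c => c != '\n')) = false := by rw [hF, hfh]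
        simp only [hxtl, List.tail_cons, reduceCtorEq, dite_false]
        simp only [List.flatMap_cons, hcc, Bool.false_eq_true, if_false, List.nil_append,
          List.cons_append, hflat, hfh]
        rw [PySem.Chars.join_cons_cons, hIH]
        simp
      · have hcc : pvCond (cs.takeWhile (fun c => c != '\n')) = true := by rw [hF, hfh]
        simp only [hxtl, List.tail_cons, reduceCtorEq, dite_false]
        simp only [List.flatMap_cons, hcc, if_true, List.cons_append, List.nil_append, hflat, hfh]
        rw [PySem.Chars.join_cons_cons, PySem.Chars.join_cons_cons, hIH]
        simp [hm, List.append_assoc]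

-- ===== VERDICT (by name: the statement is the Claim_ definition above) =====
theorem mark_for_loop_spec : Claim_equal_mark_for_loop := by
  intro code hdom
  have hd : ∀ c ∈ code.toList, pvDomChar c = true := by
    unfold Dom_mark_for_loop pvDomStr at hdom
    exact List.all_eq_true.mp hdom
  show mark_for_loop code = mark_for_loop_alt code
  show String.mk (PySem.Chars.join ['\n']
      ((PySem.Chars.splitOn code.toList ['\n']).foldl
        (fun acc line =>
          let l := PySem.Chars.lower (PySem.Chars.lstrip line)
          let acc := if PySem.Chars.startswith l "for ".toList || PySem.Chars.startswith l "for(".toList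
                     then acc ++ ["for_loop_talkad7420();".toList] else acc
          acc ++ [line]) [])) = String.mk (pvAltGo code.toList)
  rw [pvSplitOn_nl, pvFoldA]
  simp only [List.nil_append]
  exact congrArg String.mk (pvMainAux code.toList.length code.toList (le_refl _) hd)
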